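-- pv_equiv track=rewrite | github.com/scotthitch/wordle_solver | main.py | rank_letters
-- ===== SOURCE A (Python) =====
-- def rank_letters(words_list: list, used_letters: list) -> dict:
--     letters_ranked = {}
--
--     for word in words_list:
--         for character in word:
--             if character in used_letters:
--                 letters_ranked[character] = 0
--                 continue
--
--             if character not in letters_ranked:
--                 letters_ranked[character] = 1
--
--             else:
--                 letters_ranked[character] += 1
--
--     return letters_ranked
-- ===== SOURCE B (Python) =====
-- def rank_letters(words_list: list, used_letters: list) -> dict:
--     # Flatten all words into one letter sequence, take the distinct letters in
--     # first-appearance order, and compute each letter's value independently: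
--     # 0 if it was used, otherwise its total occurrence count via list.count.
--     letters = [ch for word in words_list for ch in word]
--     used = set(used_letters)
--     return {ch: (0 if ch in used else letters.count(ch))
--             for ch in dict.fromkeys(letters)}
-- ===== Notes on version B (the rewrite author's own statement) =====
-- stated objective: faster
-- what changed: B keeps no running tally at all: it flattens the words into one letter list, dedups it in first-appearance order, and computes each distinct letter's value independently (0 if used, else letters.count), removing A's per-character linear scan of used_letters and A's char-by-char incremental dict.
import Mathlib
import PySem

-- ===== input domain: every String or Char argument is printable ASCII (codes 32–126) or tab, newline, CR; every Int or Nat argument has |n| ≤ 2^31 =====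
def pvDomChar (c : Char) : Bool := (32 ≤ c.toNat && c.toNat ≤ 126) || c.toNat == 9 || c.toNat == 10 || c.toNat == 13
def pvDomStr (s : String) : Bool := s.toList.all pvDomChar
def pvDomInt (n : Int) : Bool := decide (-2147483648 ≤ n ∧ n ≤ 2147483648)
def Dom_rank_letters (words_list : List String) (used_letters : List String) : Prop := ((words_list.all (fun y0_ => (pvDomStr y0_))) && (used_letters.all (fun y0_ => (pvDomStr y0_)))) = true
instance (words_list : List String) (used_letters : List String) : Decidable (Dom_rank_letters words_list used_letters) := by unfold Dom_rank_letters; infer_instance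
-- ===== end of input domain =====

-- B keeps no running tally: it flattens the words into one letter list, dedups it in
-- first-appearance order, and computes each distinct letter's value independently
-- (0 if used, else its count in the list) — instead of A's char-by-char incremental dict.

-- ===== PORT A =====
-- A: one nested loop; per character, test used_letters, then set 0 / set 1 / increment.
def rank_letters (words_list : List String) (used_letters : List String) : List (String × Int) :=
  (words_list.foldl (fun d word =>
    word.toList.foldl (fun d c =>
      let s := c.toString
      if used_letters.contains s then d.insert s 0
      else if !(d.contains s) then d.insert s 1
      else d.insert s (d.getD s 0 + 1)) d) PySem.Dict.empty).items

-- ===== PORT B =====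
-- B: flatten words to a letter list, dedup (dict.fromkeys order), value each letter independently.
def rank_letters_alt (words_list : List String) (used_letters : List String) : List (String × Int) :=
  let letters := words_list.flatMap String.toList
  let used := PySem.Set.ofList used_letters
  (PySem.List.dedup letters).map (fun ch =>
    (ch.toString, if PySem.Set.contains used ch.toString then (0 : Int) else (letters.count ch : Int)))

-- ===== PRECONDITION & SPEC =====
def Spec_rank_letters (words_list : List String) (used_letters : List String) (out : List (String × Int)) : Prop := out = rank_letters_alt words_list used_letters
instance (words_list : List String) (used_letters : List String) (out : List (String × Int)) : Decidable (Spec_rank_letters words_list used_letters out) := by unfold Spec_rank_letters; infer_instance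

-- ===== CLAIM (what is proved, stated in full; the proofs are below) =====
def Claim_equal_rank_letters : Prop := ∀ (words_list : List String) (used_letters : List String), Dom_rank_letters words_list used_letters → Spec_rank_letters words_list used_letters (rank_letters words_list used_letters)

-- ===== LEMMAS AND PROOFS =====

-- A's per-character step, named for the proofs (definitionally the lambda in A's port)
def stepA (u : List String) (d : PySem.Dict String Int) (c : Char) : PySem.Dict String Int :=
  if u.contains c.toString then d.insert c.toString 0
  else if !(d.contains c.toString) then d.insert c.toString 1
  else d.insert c.toString (d.getD c.toString 0 + 1)

-- B's value of one distinct letter, given the whole letter list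
def valB (u : List String) (cs : List Char) (c : Char) : String × Int :=
  (c.toString, if u.contains c.toString then (0 : Int) else (cs.count c : Int))

-- B's result as a function of the flattened letter list
def model (u : List String) (cs : List Char) : List (String × Int) :=
  (PySem.Set.ofList cs).map (valB u cs)

theorem toString_inj {a b : Char} (h : a.toString = b.toString) : a = b := by
  have := congrArg String.toList h
  simpa using this

theorem keys_model (u : List String) (cs : List Char) :
    (PySem.Dict.mk (model u cs)).keys = (PySem.Set.ofList cs).map (fun b => b.toString) := by
  show (model u cs).map (·.1) = _
  unfold model
  rw [List.map_map]
  rfl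

theorem nodup_keys_model (u : List String) (cs : List Char) :
    (PySem.Dict.mk (model u cs)).keys.Nodup := by
  rw [keys_model]
  exact (PySem.Set.nodup_ofList cs).map (fun a b h => toString_inj h)

theorem mem_map_toString (cs : List Char) (c : Char) :
    c.toString ∈ (PySem.Set.ofList cs).map (fun b => b.toString) ↔ c ∈ cs := by
  rw [List.mem_map]
  constructor
  · rintro ⟨b, hb, hbs⟩
    exact (PySem.Set.mem_ofList cs c).mp (toString_inj hbs ▸ hb)
  · intro h
    exact ⟨c, (PySem.Set.mem_ofList cs c).mpr h, rfl⟩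

theorem contains_model (u : List String) (cs : List Char) (c : Char) :
    (PySem.Dict.mk (model u cs)).contains c.toString = decide (c ∈ cs) := by
  rw [PySem.Dict.contains_eq_decide_mem_keys, keys_model]
  exact decide_eq_decide.mpr (mem_map_toString cs c)

theorem getD_model (u : List String) (cs : List Char) (c : Char) (h : c ∈ cs) :
    (PySem.Dict.mk (model u cs)).getD c.toString 0 = (valB u cs c).2 := by
  have hm : (c.toString, (valB u cs c).2) ∈ (PySem.Dict.mk (model u cs)).items := by
    show _ ∈ model u cs
    exact List.mem_map_of_mem ((PySem.Set.mem_ofList cs c).mpr h)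
  exact PySem.Dict.getD_of_mem_items _ hm (nodup_keys_model u cs) 0

theorem valB_append_ne (u : List String) (cs : List Char) (b c : Char) (h : b ≠ c) :
    valB u (cs ++ [c]) b = valB u cs b := by
  have : (cs ++ [c]).count b = cs.count b := by
    simp [List.count_append, Ne.symm h]
  simp [valB, this]

theorem count_append_self (cs : List Char) (c : Char) :
    ((cs ++ [c]).count c : Int) = (cs.count c : Int) + 1 := by
  rw [List.count_append, List.count_singleton]
  simp

theorem step_model (u : List String) (cs : List Char) (c : Char) :
    stepA u (PySem.Dict.mk (model u cs)) c = PySem.Dict.mk (model u (cs ++ [c])) := by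
  apply PySem.Dict.ext
  show (stepA u (PySem.Dict.mk (model u cs)) c).items = model u (cs ++ [c])
  by_cases hmem : c ∈ cs
  · -- c already seen: the distinct-letter list is unchanged; A overwrites the entry in place
    have hadd : PySem.Set.ofList (cs ++ [c]) = PySem.Set.ofList cs := by
      rw [PySem.Set.ofList_append_singleton,
          PySem.Set.add_of_mem ((PySem.Set.mem_ofList cs c).mpr hmem)]
    have hcont : (PySem.Dict.mk (model u cs)).contains c.toString = true := by
      rw [contains_model]; exact decide_eq_true hmem
    have core : ∀ v : Int, v = (valB u (cs ++ [c]) c).2 →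
        ((PySem.Dict.mk (model u cs)).insert c.toString v).items = model u (cs ++ [c]) := by
      intro v hv
      rw [PySem.Dict.items_insert_of_contains _ _ hcont]
      show (model u cs).map _ = _
      unfold model
      rw [hadd, List.map_map]
      apply List.map_congr_left
      intro b hb
      show (if ((valB u cs b).1 == c.toString) = true then (c.toString, v) else valB u cs b)
            = valB u (cs ++ [c]) b
      by_cases hbc : b = c
      · subst hbc
        have h1 : ((valB u cs b).1 == b.toString) = true := beq_iff_eq.mpr rfl
        rw [if_pos h1, hv]
        rfl
      · have hne : ((valB u cs b).1 == c.toString) = false :=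
          beq_eq_false_iff_ne.mpr (fun hh => hbc (toString_inj hh))
        rw [hne]
        simp only [Bool.false_eq_true, if_false]
        exact (valB_append_ne u cs b c hbc).symm
    unfold stepA
    split_ifs with h1 h2
    · exact core 0 (by simp only [valB]; rw [if_pos h1])
    · exfalso
      rw [hcont] at h2
      exact absurd h2 (by simp)
    · refine core _ ?_
      rw [getD_model u cs c hmem]
      have h1' : u.contains c.toString = false := by simpa using h1
      simp only [valB, h1', Bool.false_eq_true, if_false]
      exact (count_append_self cs c).symm
  · -- c fresh: both sides append a new entry at the end
    have hadd : PySem.Set.ofList (cs ++ [c]) = PySem.Set.ofList cs ++ [c] := by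
      rw [PySem.Set.ofList_append_singleton,
          PySem.Set.add_of_not_mem (fun hh => hmem ((PySem.Set.mem_ofList cs c).mp hh))]
    have hcont : (PySem.Dict.mk (model u cs)).contains c.toString = false := by
      rw [contains_model]; exact decide_eq_false hmem
    have hcount0 : cs.count c = 0 := List.count_eq_zero.mpr hmem
    have prefix_eq : (PySem.Set.ofList cs).map (valB u (cs ++ [c])) = model u cs := by
      unfold model
      apply List.map_congr_left
      intro b hb
      exact valB_append_ne u cs b c
        (fun hh => hmem (hh ▸ (PySem.Set.mem_ofList cs b).mp hb))
    have tail2 : (valB u (cs ++ [c]) c).2 = if u.contains c.toString then (0 : Int) else 1 := by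
      simp only [valB, count_append_self cs c, hcount0]
      norm_num
    have model_eq : model u (cs ++ [c]) =
        model u cs ++ [(c.toString, (valB u (cs ++ [c]) c).2)] := by
      unfold model
      rw [hadd, List.map_append, prefix_eq]
      rfl
    unfold stepA
    split_ifs with h1 h2
    · rw [PySem.Dict.items_insert_of_not_contains _ _ hcont, model_eq, tail2, if_pos h1]
    · rw [PySem.Dict.items_insert_of_not_contains _ _ hcont, model_eq, tail2, if_neg h1]
    · exfalso
      rw [hcont] at h2
      exact absurd rfl h2

theorem fold_model (u : List String) (cs : List Char) :
    cs.foldl (stepA u) PySem.Dict.empty = PySem.Dict.mk (model u cs) := by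
  induction cs using List.reverseRecOn with
  | nil => rfl
  | append_singleton cs c ih =>
    rw [List.foldl_append, List.foldl_cons, List.foldl_nil, ih, step_model]

theorem fold_words_flat (u : List String) (ws : List String) (d : PySem.Dict String Int) :
    ws.foldl (fun d word => word.toList.foldl (stepA u) d) d
      = (ws.flatMap String.toList).foldl (stepA u) d := by
  induction ws generalizing d with
  | nil => rfl
  | cons w t ih => simp [List.flatMap_cons, List.foldl_append, ih]

theorem set_contains_eq (l : List String) (x : String) :
    PySem.Set.contains (PySem.Set.ofList l) x = l.contains x := by
  by_cases h : x ∈ l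
  · simp [(PySem.Set.mem_ofList l x).mpr h, h]
  · simp [h, (PySem.Set.mem_ofList l x).not.mpr h]

-- ===== VERDICT (by name: the statement is the Claim_ definition above) =====
theorem rank_letters_spec : Claim_equal_rank_letters := by
  intro ws u _
  unfold Spec_rank_letters rank_letters rank_letters_alt
  have hA : (ws.foldl (fun d word =>
      word.toList.foldl (fun d c =>
        let s := c.toString
        if u.contains s then d.insert s 0
        else if !(d.contains s) then d.insert s 1
        else d.insert s (d.getD s 0 + 1)) d) PySem.Dict.empty)
      = PySem.Dict.mk (model u (ws.flatMap String.toList)) := by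
    show ws.foldl (fun d word => word.toList.foldl (stepA u) d) PySem.Dict.empty = _
    rw [fold_words_flat, fold_model]
  rw [hA]
  show model u (ws.flatMap String.toList)
      = (PySem.List.dedup (ws.flatMap String.toList)).map (fun ch =>
          (ch.toString, if PySem.Set.contains (PySem.Set.ofList u) ch.toString then (0 : Int)
            else ((ws.flatMap String.toList).count ch : Int)))
  rw [PySem.List.dedup_eq_ofList]
  apply List.map_congr_left
  intro b _
  show valB u (ws.flatMap String.toList) b = _
  simp only [valB, set_contains_eq]
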